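-- pv_equiv track=rewrite | github.com/zwg19941024/ros2nav2 | Ros_ws/Nav2_ws/src/isaac_nav2/isaac_nav2/realsenseD435 copy2.py | set_h264_bitrate_hints
-- ===== SOURCE A (Python) =====
-- def set_h264_bitrate_hints(sdp, min_kbps, max_kbps):
--     """为H264 payload附加 x-google-min/max-bitrate 提示（仅在answer中修改）。
--     优化版：添加更快的编码器预设以减少CPU负担"""
--     lines = sdp.splitlines()
--     h264_pts = set()
--     # 收集H264负载类型号
--     for i, line in enumerate(lines):
--         if line.startswith("a=rtpmap:") and "H264/90000" in line:
--             try: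
--                 pt = line.split(":", 1)[1].split()[0]
--                 h264_pts.add(pt)
--             except Exception:
--                 continue
--     if not h264_pts:
--         return sdp
--
--     def update_fmtp(payload_type):
--         prefix = f"a=fmtp:{payload_type} "
--         for i, line in enumerate(lines):
--             if line.startswith(prefix):
--                 params = line[len(prefix):]
--                 parts = [p.strip() for p in params.split(";") if p.strip()]
--                 kv = {}
--                 for p in parts:
--                     if "=" in p:
--                         k, v = p.split("=", 1)
--                         kv[k.strip()] = v.strip()
--                     else:
--                         kv[p] = ""
--                 # 添加码率提示
--                 kv["x-google-max-bitrate"] = str(max_kbps)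
--                 kv["x-google-min-bitrate"] = str(min_kbps)
--                 # 添加编码器速度提示（减少CPU负担）
--                 kv["x-google-start-bitrate"] = str((min_kbps + max_kbps) // 2)
--                 new_params = ";".join([f"{k}={v}" if v != "" else k for k, v in kv.items()])
--                 lines[i] = prefix + new_params
--                 return True
--         return False
--
--     for pt in h264_pts:
--         if not update_fmtp(pt):
--             # 若没有fmtp行，则新增一行
--             lines.append(f"a=fmtp:{pt} x-google-min-bitrate={min_kbps};x-google-max-bitrate={max_kbps};x-google-start-bitrate={(min_kbps + max_kbps) // 2}")
--
--     return "\r\n".join(lines)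
-- ===== SOURCE B (Python) =====
-- def set_h264_bitrate_hints(sdp, min_kbps, max_kbps):
--     lines = sdp.splitlines()
--     h264_pts = []
--     for line in lines:
--         if line.startswith("a=rtpmap:") and "H264/90000" in line:
--             toks = line.split(":", 1)[1].split()
--             if toks and toks[0] not in h264_pts:
--                 h264_pts.append(toks[0])
--     if not h264_pts:
--         return sdp
--
--     start = (min_kbps + max_kbps) // 2
--
--     def rewrite(line, pt):
--         params = line[len("a=fmtp:" + pt + " "):]
--         parts = [p.strip() for p in params.split(";") if p.strip()]
--         kv = {}
--         for p in parts:
--             if "=" in p: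
--                 k, v = p.split("=", 1)
--                 kv[k.strip()] = v.strip()
--             else:
--                 kv[p] = ""
--         kv["x-google-max-bitrate"] = str(max_kbps)
--         kv["x-google-min-bitrate"] = str(min_kbps)
--         kv["x-google-start-bitrate"] = str(start)
--         return "a=fmtp:" + pt + " " + ";".join(
--             k if v == "" else f"{k}={v}" for k, v in kv.items())
--
--     out = []
--     pending = list(h264_pts)
--     for line in lines:
--         pt = next((p for p in pending if line.startswith(f"a=fmtp:{p} ")), None)
--         if pt is None:
--             out.append(line)
--         else:
--             pending = [q for q in pending if q != pt]
--             out.append(rewrite(line, pt))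
--     for pt in pending:
--         out.append(f"a=fmtp:{pt} x-google-min-bitrate={min_kbps};"
--                    f"x-google-max-bitrate={max_kbps};x-google-start-bitrate={start}")
--     return "\r\n".join(out)
-- ===== Notes on version B (the rewrite author's own statement) =====
-- stated objective: alternative
-- what changed: A loops over the payload-type set and rescans/mutates the line list once per payload type; B makes one forward pass over the lines carrying a 'pending' list, rewriting the first fmtp line of each pending payload type as it is met and appending the still-pending ones at the end.
import Mathlib
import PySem

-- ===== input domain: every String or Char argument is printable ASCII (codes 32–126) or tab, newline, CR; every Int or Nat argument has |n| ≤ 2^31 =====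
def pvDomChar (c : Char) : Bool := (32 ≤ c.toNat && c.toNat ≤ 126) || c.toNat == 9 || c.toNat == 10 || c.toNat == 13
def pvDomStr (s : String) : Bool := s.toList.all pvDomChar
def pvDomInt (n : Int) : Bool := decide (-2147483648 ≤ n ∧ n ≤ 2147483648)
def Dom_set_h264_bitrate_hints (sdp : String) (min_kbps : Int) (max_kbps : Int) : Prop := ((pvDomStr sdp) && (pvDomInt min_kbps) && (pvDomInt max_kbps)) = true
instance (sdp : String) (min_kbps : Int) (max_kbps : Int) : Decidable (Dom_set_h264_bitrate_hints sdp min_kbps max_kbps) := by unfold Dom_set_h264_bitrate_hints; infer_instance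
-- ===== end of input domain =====

-- B replaces A's per-payload-type rescans of the (mutated) line list by ONE forward pass over the
-- lines with a 'pending' payload-type list, appending the still-missing fmtp lines afterwards
-- (objective: alternative). Equivalence is claimed on SDPs declaring at most one distinct H264
-- payload type (see Pre_ below).

-- ===== PORT A =====
-- A's first loop: collect H264 payload types into a set (try/except → Option fallthroughs).
def pvCollectA (lines : List String) : PySem.Set String :=
  lines.foldl (fun s line =>
    if PySem.Str.startswith line "a=rtpmap:" && PySem.Str.isIn "H264/90000" line then
      match PySem.Str.splitMax? line ":" 1 with
      | some ps =>
        match PySem.List.pyGet? ps 1 with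
        | some rest =>
          match PySem.List.pyGet? (PySem.Str.split₀ rest) 0 with
          | some pt => PySem.Set.add s pt
          | none => s          -- IndexError, caught by A's except: continue
        | none => s            -- IndexError, caught by A's except: continue
      | none => s              -- unreachable: separator ":" is nonempty
    else s) []

-- the body of A's update_fmtp on a matching line (params split, kv dict, rejoin)
def pvRewriteA (line : String) (pt : String) (min_kbps max_kbps : Int) : String :=
  let pfx := "a=fmtp:" ++ pt ++ " "
  let params := PySem.Str.slice line (some (PySem.Str.len pfx : Int)) none
  let parts := ((((PySem.Str.split? params ";").getD [])).map PySem.Str.strip).filter (fun p => p ≠ "")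
  let kv : PySem.Dict String String :=
    parts.foldl (fun d p =>
      if PySem.Str.isIn "=" p then
        match PySem.Str.splitMax? p "=" 1 with
        | some (k :: v :: _) => d.insert (PySem.Str.strip k) (PySem.Str.strip v)
        | _ => d               -- unreachable: "=" ∈ p gives two pieces
      else d.insert p "") PySem.Dict.empty
  let kv := ((kv.insert "x-google-max-bitrate" (PySem.Int.toStr max_kbps)).insert
              "x-google-min-bitrate" (PySem.Int.toStr min_kbps)).insert
              "x-google-start-bitrate" (PySem.Int.toStr (PySem.Int.floordiv (min_kbps + max_kbps) 2))
  pfx ++ PySem.Str.join ";" (kv.items.map (fun kvp => if kvp.2 = "" then kvp.1 else kvp.1 ++ "=" ++ kvp.2))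

-- A's update_fmtp: rewrite the FIRST line starting with "a=fmtp:<pt> " (none = returned False)
def pvUpdA (pt : String) (min_kbps max_kbps : Int) : List String → Option (List String)
  | [] => none
  | line :: rest =>
    if PySem.Str.startswith line ("a=fmtp:" ++ pt ++ " ") then
      some (pvRewriteA line pt min_kbps max_kbps :: rest)
    else (pvUpdA pt min_kbps max_kbps rest).map (line :: ·)

def pvNewFmtpLine (pt : String) (min_kbps max_kbps : Int) : String :=
  "a=fmtp:" ++ pt ++ " x-google-min-bitrate=" ++ PySem.Int.toStr min_kbps ++
  ";x-google-max-bitrate=" ++ PySem.Int.toStr max_kbps ++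
  ";x-google-start-bitrate=" ++ PySem.Int.toStr (PySem.Int.floordiv (min_kbps + max_kbps) 2)

def set_h264_bitrate_hints (sdp : String) (min_kbps : Int) (max_kbps : Int) : String :=
  let lines := PySem.Str.splitlines sdp
  let h264_pts := pvCollectA lines
  if h264_pts = [] then sdp
  else
    let lines := h264_pts.foldl (fun ls pt =>
      match pvUpdA pt min_kbps max_kbps ls with
      | some ls' => ls'
      | none => ls ++ [pvNewFmtpLine pt min_kbps max_kbps]) lines
    PySem.Str.join "\r\n" lines

-- ===== PORT B =====
-- B's first loop: ordered duplicate-free list of H264 payload types.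
def pvCollectB (lines : List String) : List String :=
  lines.foldl (fun pts line =>
    if PySem.Str.startswith line "a=rtpmap:" && PySem.Str.isIn "H264/90000" line then
      match PySem.Str.splitMax? line ":" 1 with
      | some ps =>
        match PySem.List.pyGet? ps 1 with
        | some rest =>
          match PySem.Str.split₀ rest with
          | t :: _ => if pts.contains t then pts else pts ++ [t]
          | [] => pts
        | none => pts
      | none => pts            -- unreachable: separator ":" is nonempty
    else pts) []

-- Source B's rewrite(line, pt) (start precomputed once)
def pvRewriteB (line : String) (pt : String) (min_kbps max_kbps start : Int) : String :=
  let params := PySem.Str.slice line (some (PySem.Str.len ("a=fmtp:" ++ pt ++ " ") : Int)) none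
  let parts := ((((PySem.Str.split? params ";").getD [])).map PySem.Str.strip).filter (fun p => p ≠ "")
  let kv : PySem.Dict String String :=
    parts.foldl (fun d p =>
      if PySem.Str.isIn "=" p then
        match PySem.Str.splitMax? p "=" 1 with
        | some (k :: v :: _) => d.insert (PySem.Str.strip k) (PySem.Str.strip v)
        | _ => d               -- unreachable: "=" ∈ p gives two pieces
      else d.insert p "") PySem.Dict.empty
  let kv := ((kv.insert "x-google-max-bitrate" (PySem.Int.toStr max_kbps)).insert
              "x-google-min-bitrate" (PySem.Int.toStr min_kbps)).insert
              "x-google-start-bitrate" (PySem.Int.toStr start)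
  "a=fmtp:" ++ pt ++ " " ++
    PySem.Str.join ";" (kv.items.map (fun kvp => if kvp.2 = "" then kvp.1 else kvp.1 ++ "=" ++ kvp.2))

def pvPendingLine (pt : String) (min_kbps max_kbps start : Int) : String :=
  "a=fmtp:" ++ pt ++ " x-google-min-bitrate=" ++ PySem.Int.toStr min_kbps ++
  ";x-google-max-bitrate=" ++ PySem.Int.toStr max_kbps ++
  ";x-google-start-bitrate=" ++ PySem.Int.toStr start

-- Source B's single pass: state = (out, pending)
def pvStepB (min_kbps max_kbps start : Int) (s : List String × List String) (line : String) :
    List String × List String :=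
  match s.2.find? (fun p => PySem.Str.startswith line ("a=fmtp:" ++ p ++ " ")) with
  | some p => (s.1 ++ [pvRewriteB line p min_kbps max_kbps start], s.2.filter (fun q => q ≠ p))
  | none => (s.1 ++ [line], s.2)

def set_h264_bitrate_hints_alt (sdp : String) (min_kbps : Int) (max_kbps : Int) : String :=
  let lines := PySem.Str.splitlines sdp
  let h264_pts := pvCollectB lines
  if h264_pts = [] then sdp
  else
    let start := PySem.Int.floordiv (min_kbps + max_kbps) 2
    let res := lines.foldl (pvStepB min_kbps max_kbps start) ([], h264_pts)
    PySem.Str.join "\r\n" (res.1 ++ res.2.map (fun pt => pvPendingLine pt min_kbps max_kbps start))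

-- ===== PRECONDITION & SPEC =====
-- the H264 payload type a line declares, if any (for stating Pre_ only)
def pvPtOf (line : String) : Option String :=
  if PySem.Str.startswith line "a=rtpmap:" && PySem.Str.isIn "H264/90000" line then
    (PySem.Str.splitMax? line ":" 1).bind (fun ps =>
      (PySem.List.pyGet? ps 1).bind (fun rest => PySem.List.pyGet? (PySem.Str.split₀ rest) 0))
  else none

-- Pre_ excludes SDPs declaring MORE THAN ONE distinct H264 payload type: there A iterates the
-- payload types in CPython's hash-randomized set order, so the relative order of its per-type
-- updates and appended fmtp lines is accidental.
def Pre_set_h264_bitrate_hints (sdp : String) (min_kbps : Int) (max_kbps : Int) : Prop :=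
  (PySem.List.dedup ((PySem.Str.splitlines sdp).filterMap pvPtOf)).length ≤ 1

instance (sdp : String) (min_kbps : Int) (max_kbps : Int) : Decidable (Pre_set_h264_bitrate_hints sdp min_kbps max_kbps) := by unfold Pre_set_h264_bitrate_hints; infer_instance

def pvWitness_set_h264_bitrate_hints : String × Int × Int :=
  ("v=0\r\na=rtpmap:96 H264/90000\r\na=fmtp:96 profile-level-id=42e01f", 300, 1200)

def Spec_set_h264_bitrate_hints (sdp : String) (min_kbps : Int) (max_kbps : Int) (out : String) : Prop := out = set_h264_bitrate_hints_alt sdp min_kbps max_kbps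
instance (sdp : String) (min_kbps : Int) (max_kbps : Int) (out : String) : Decidable (Spec_set_h264_bitrate_hints sdp min_kbps max_kbps out) := by unfold Spec_set_h264_bitrate_hints; infer_instance

-- ===== CLAIM (what is proved, stated in full; the proofs are below) =====
def Claim_equal_set_h264_bitrate_hints : Prop := ∀ (sdp : String) (min_kbps : Int) (max_kbps : Int), Dom_set_h264_bitrate_hints sdp min_kbps max_kbps → Pre_set_h264_bitrate_hints sdp min_kbps max_kbps → Spec_set_h264_bitrate_hints sdp min_kbps max_kbps (set_h264_bitrate_hints sdp min_kbps max_kbps)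

-- ===== LEMMAS AND PROOFS =====

theorem pvWitness_ok :
    Dom_set_h264_bitrate_hints (pvWitness_set_h264_bitrate_hints.1)
      (pvWitness_set_h264_bitrate_hints.2.1) (pvWitness_set_h264_bitrate_hints.2.2) ∧
    Pre_set_h264_bitrate_hints (pvWitness_set_h264_bitrate_hints.1)
      (pvWitness_set_h264_bitrate_hints.2.1) (pvWitness_set_h264_bitrate_hints.2.2) := by
  decide

-- A's collection step, phrased through pvPtOf
theorem collectA_eq_aux (lines : List String) (init : PySem.Set String) :
    lines.foldl (fun s line =>
      if PySem.Str.startswith line "a=rtpmap:" && PySem.Str.isIn "H264/90000" line then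
        match PySem.Str.splitMax? line ":" 1 with
        | some ps =>
          match PySem.List.pyGet? ps 1 with
          | some rest =>
            match PySem.List.pyGet? (PySem.Str.split₀ rest) 0 with
            | some pt => PySem.Set.add s pt
            | none => s
          | none => s
        | none => s
      else s) init = (lines.filterMap pvPtOf).foldl PySem.Set.add init := by
  induction lines generalizing init with
  | nil => rfl
  | cons line rest ih =>
    simp only [List.foldl_cons, List.filterMap_cons]
    have hstep : (if PySem.Str.startswith line "a=rtpmap:" && PySem.Str.isIn "H264/90000" line then
        match PySem.Str.splitMax? line ":" 1 with
        | some ps =>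
          match PySem.List.pyGet? ps 1 with
          | some rest =>
            match PySem.List.pyGet? (PySem.Str.split₀ rest) 0 with
            | some pt => PySem.Set.add init pt
            | none => init
          | none => init
        | none => init
      else init) = match pvPtOf line with
        | some pt => PySem.Set.add init pt
        | none => init := by
      by_cases h : (PySem.Str.startswith line "a=rtpmap:" && PySem.Str.isIn "H264/90000" line) = true
      · rw [pvPtOf, if_pos h, if_pos h]
        cases h1 : PySem.Str.splitMax? line ":" 1 with
        | none => rfl
        | some ps =>
          cases h2 : PySem.List.pyGet? ps 1 with
          | none => simp [h2]
          | some r =>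
            cases h3 : PySem.List.pyGet? (PySem.Str.split₀ r) 0 <;> simp [h2, h3]
      · rw [pvPtOf, if_neg h, if_neg h]
    rw [hstep]
    cases hpt : pvPtOf line with
    | none => simpa using ih init
    | some pt => simpa using ih (PySem.Set.add init pt)

theorem collectA_eq (lines : List String) :
    pvCollectA lines = PySem.List.dedup (lines.filterMap pvPtOf) := by
  rw [pvCollectA, collectA_eq_aux]
  rfl

-- B collects the same list as A
theorem collectB_eq_collectA (lines : List String) :
    pvCollectB lines = pvCollectA lines := by
  rw [pvCollectB, pvCollectA]
  have hfun : (fun (pts : List String) (line : String) =>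
      if PySem.Str.startswith line "a=rtpmap:" && PySem.Str.isIn "H264/90000" line then
        match PySem.Str.splitMax? line ":" 1 with
        | some ps =>
          match PySem.List.pyGet? ps 1 with
          | some rest =>
            match PySem.Str.split₀ rest with
            | t :: _ => if pts.contains t then pts else pts ++ [t]
            | [] => pts
          | none => pts
        | none => pts
      else pts) = (fun (s : PySem.Set String) (line : String) =>
      if PySem.Str.startswith line "a=rtpmap:" && PySem.Str.isIn "H264/90000" line then
        match PySem.Str.splitMax? line ":" 1 with
        | some ps =>
          match PySem.List.pyGet? ps 1 with
          | some rest =>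
            match PySem.List.pyGet? (PySem.Str.split₀ rest) 0 with
            | some pt => PySem.Set.add s pt
            | none => s
          | none => s
        | none => s
      else s) := by
    funext s line
    by_cases h : (PySem.Str.startswith line "a=rtpmap:" && PySem.Str.isIn "H264/90000" line) = true
    · rw [if_pos h, if_pos h]
      cases h1 : PySem.Str.splitMax? line ":" 1 with
      | none => rfl
      | some ps =>
        cases h2 : PySem.List.pyGet? ps 1 with
        | none => simp [h2]
        | some r =>
          cases h3 : PySem.Str.split₀ r with
          | nil =>
            have e : PySem.List.pyGet? ([] : List String) 0 = none := by decide
            simp [h2, h3, e]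
          | cons t ts => simp [h2, h3, PySem.Set.add]
    · rw [if_neg h, if_neg h]
  rw [hfun]

-- a pass with empty pending copies the lines through
theorem foldB_nil_pending (mn mx st : Int) (lines out : List String) :
    lines.foldl (pvStepB mn mx st) (out, []) = (out ++ lines, []) := by
  induction lines generalizing out with
  | nil => simp
  | cons line rest ih =>
    simp only [List.foldl_cons, pvStepB, List.find?_nil]
    rw [ih (out ++ [line])]
    simp

-- the single-payload-type pass equals A's update_fmtp scan
theorem foldB_single (mn mx st : Int) (pt : String) (hst : st = PySem.Int.floordiv (mn + mx) 2)
    (lines out : List String) :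
    lines.foldl (pvStepB mn mx st) (out, [pt]) =
      match pvUpdA pt mn mx lines with
      | some l => (out ++ l, [])
      | none => (out ++ lines, [pt]) := by
  induction lines generalizing out with
  | nil => simp [pvUpdA]
  | cons line rest ih =>
    by_cases hc : PySem.Str.startswith line ("a=fmtp:" ++ pt ++ " ") = true
    · have hfind : List.find? (fun p => PySem.Str.startswith line ("a=fmtp:" ++ p ++ " ")) [pt]
          = some pt := List.find?_cons_of_pos hc
      have hrw : pvRewriteB line pt mn mx st = pvRewriteA line pt mn mx := by
        subst hst; rfl
      simp only [List.foldl_cons, pvStepB, hfind]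
      have hfilter : List.filter (fun q => decide (q ≠ pt)) [pt] = ([] : List String) := by simp
      rw [hfilter, foldB_nil_pending, pvUpdA, if_pos hc, hrw]
      simp
    · have hfind : List.find? (fun p => PySem.Str.startswith line ("a=fmtp:" ++ p ++ " ")) [pt]
          = none := by
        simpa using List.find?_cons_of_neg (l := ([] : List String)) hc
      simp only [List.foldl_cons, pvStepB, hfind]
      rw [ih (out ++ [line]), pvUpdA, if_neg hc]
      cases pvUpdA pt mn mx rest <;> simp

-- ===== VERDICT (by name: the statement is the Claim_ definition above) =====
theorem set_h264_bitrate_hints_spec : Claim_equal_set_h264_bitrate_hints := by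
  intro sdp mn mx _ hpre
  unfold Spec_set_h264_bitrate_hints set_h264_bitrate_hints set_h264_bitrate_hints_alt
  simp only [collectB_eq_collectA]
  have hlen : (pvCollectA (PySem.Str.splitlines sdp)).length ≤ 1 := by
    rw [collectA_eq]
    exact hpre
  generalize hl : PySem.Str.splitlines sdp = lines at *
  match hA : pvCollectA lines with
  | [] => simp
  | [pt] =>
    simp only [List.foldl_cons, List.foldl_nil, if_neg, not_false_eq_true, List.cons_ne_nil]
    rw [foldB_single mn mx _ pt rfl lines []]
    cases hupd : pvUpdA pt mn mx lines with
    | some l => simp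
    | none => simp [pvPendingLine, pvNewFmtpLine]
  | a :: b :: r => rw [hA] at hlen; simp at hlen
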